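-- pv_equiv track=rewrite | github.com/creditimpact/finance-project-2-0 | backend/core/logic/report_analysis/account_merge.py | _select_skip_reason_top
-- ===== SOURCE A (Python) =====
-- from typing import (
--     Any,
--     Dict,
--     Iterable,
--     Iterator,
--     List,
--     Mapping,
--     Optional,
--     Sequence,
--     Set,
--     Tuple,
--     Union,
-- )
--
-- def _select_skip_reason_top(counts: Mapping[str, int]) -> Optional[str]:
--     """Return the plurality skip reason with lexicographic tie-break."""
--
--     if not counts:
--         return None
--     max_count = max(int(value) for value in counts.values())
--     top_keys = [key for key, value in counts.items() if int(value) == max_count]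
--     if not top_keys:
--         return None
--     return sorted(top_keys)[0]
-- ===== SOURCE B (Python) =====
-- def _select_skip_reason_top(counts):
--     """Return the plurality skip reason with lexicographic tie-break (single pass)."""
--     best_key = None
--     best_count = None
--     for key, value in counts.items():
--         c = int(value)
--         if best_key is None or c > best_count or (c == best_count and key < best_key):
--             best_key, best_count = key, c
--     return best_key
-- ===== Notes on version B (the rewrite author's own statement) =====
-- stated objective: simpler
-- what changed: Replaced the three passes (max over values, filter of top keys, sort and take head) by a single fold over the items that keeps the current best (key, count), updating on a strictly larger count or an equal count with a lexicographically smaller key.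
import Mathlib
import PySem

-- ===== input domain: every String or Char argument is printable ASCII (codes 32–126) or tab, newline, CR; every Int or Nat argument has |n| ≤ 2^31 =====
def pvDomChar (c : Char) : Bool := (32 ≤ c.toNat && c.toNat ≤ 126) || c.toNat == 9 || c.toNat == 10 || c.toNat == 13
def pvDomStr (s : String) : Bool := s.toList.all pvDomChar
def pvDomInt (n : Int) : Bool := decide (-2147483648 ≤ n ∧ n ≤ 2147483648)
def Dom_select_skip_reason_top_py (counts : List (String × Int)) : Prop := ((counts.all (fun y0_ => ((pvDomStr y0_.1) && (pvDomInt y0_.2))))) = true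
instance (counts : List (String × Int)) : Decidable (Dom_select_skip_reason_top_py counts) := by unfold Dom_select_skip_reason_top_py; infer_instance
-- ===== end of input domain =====

-- B replaces A's three passes (max over values, filter of top keys, sort + head) by one
-- fold keeping the best (key, count); objective: simpler (one pass, no sort).

-- ===== PORT A =====
-- literal transliteration of A: empty check, max over values, filter of top keys, sorted(...)[0]
def select_skip_reason_top_py (counts : List (String × Int)) : Option String :=
  if counts = [] then none
  else
    match PySem.List.max? (counts.map (fun kv => kv.2)) (fun v => v) with
    | none => none
    | some maxCount =>
      let topKeys := (counts.filter (fun kv => kv.2 == maxCount)).map Prod.fst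
      if topKeys = [] then none
      else PySem.List.pyGet? (PySem.List.sorted topKeys (fun k => k) false) 0

-- ===== PORT B =====
-- the loop body of Source B: keep the best (key, count) seen so far
def pvBestStep (best : Option (String × Int)) (kv : String × Int) : Option (String × Int) :=
  match best with
  | none => some kv
  | some bkc =>
    if bkc.2 < kv.2 || (kv.2 == bkc.2 && kv.1 < bkc.1) then some kv else some bkc

def select_skip_reason_top_py_alt (counts : List (String × Int)) : Option String :=
  (counts.foldl pvBestStep none).map Prod.fst

-- ===== PRECONDITION & SPEC =====
def Spec_select_skip_reason_top_py (counts : List (String × Int)) (out : Option String) : Prop := out = select_skip_reason_top_py_alt counts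
instance (counts : List (String × Int)) (out : Option String) : Decidable (Spec_select_skip_reason_top_py counts out) := by unfold Spec_select_skip_reason_top_py; infer_instance

-- ===== CLAIM (what is proved, stated in full; the proofs are below) =====
def Claim_equal_select_skip_reason_top_py : Prop := ∀ (counts : List (String × Int)), Dom_select_skip_reason_top_py counts → Spec_select_skip_reason_top_py counts (select_skip_reason_top_py counts)

-- ===== LEMMAS AND PROOFS =====

-- pvBestStep keeps a pair that dominates both its arguments
theorem pvBestStep_dom (b kv : String × Int) :
    ∃ b', pvBestStep (some b) kv = some b' ∧ (b' = b ∨ b' = kv) ∧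
      b.2 ≤ b'.2 ∧ (b.2 = b'.2 → b'.1 ≤ b.1) ∧ kv.2 ≤ b'.2 ∧ (kv.2 = b'.2 → b'.1 ≤ kv.1) := by
  by_cases hc : (b.2 < kv.2 || (kv.2 == b.2 && kv.1 < b.1)) = true
  · refine ⟨kv, by simp only [pvBestStep]; rw [if_pos hc], Or.inr rfl, ?_, ?_, le_refl _, fun _ => le_refl _⟩
    · simp only [Bool.or_eq_true, Bool.and_eq_true, decide_eq_true_eq, beq_iff_eq] at hc
      rcases hc with h | ⟨h, _⟩
      · exact le_of_lt h
      · omega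
    · intro heq
      simp only [Bool.or_eq_true, Bool.and_eq_true, decide_eq_true_eq, beq_iff_eq] at hc
      rcases hc with h | ⟨_, h2⟩
      · omega
      · exact le_of_lt h2
  · refine ⟨b, by simp only [pvBestStep]; rw [if_neg hc], Or.inl rfl, le_refl _, fun _ => le_refl _, ?_, ?_⟩
    · simp only [Bool.or_eq_true, Bool.and_eq_true, decide_eq_true_eq, beq_iff_eq,
        not_or, not_and, not_lt] at hc
      exact hc.1
    · intro heq
      simp only [Bool.or_eq_true, Bool.and_eq_true, decide_eq_true_eq, beq_iff_eq,
        not_or, not_and, not_lt] at hc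
      exact hc.2 heq

-- the fold from B returns a member of its inputs that is optimal: maximal count, minimal key among those
theorem pvBestStep_fold_spec (l : List (String × Int)) (b : String × Int) :
    ∃ r, l.foldl pvBestStep (some b) = some r ∧ r ∈ b :: l ∧
      ∀ x ∈ b :: l, x.2 ≤ r.2 ∧ (x.2 = r.2 → r.1 ≤ x.1) := by
  induction l generalizing b with
  | nil =>
    refine ⟨b, rfl, List.mem_cons_self .., ?_⟩
    rintro x hx
    rcases List.mem_cons.1 hx with rfl | hx
    · exact ⟨le_refl _, fun _ => le_refl _⟩
    · cases hx
  | cons kv t ih =>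
    obtain ⟨b', hstep, hmemb', hdb1, hdb2, hdk1, hdk2⟩ := pvBestStep_dom b kv
    obtain ⟨r, hfold, hmem, hopt⟩ := ih b'
    refine ⟨r, ?_, ?_, ?_⟩
    · simpa [List.foldl_cons, hstep] using hfold
    · rcases List.mem_cons.1 hmem with rfl | hr
      · rcases hmemb' with rfl | rfl
        · exact List.mem_cons_self ..
        · exact List.mem_cons_of_mem _ (List.mem_cons_self ..)
      · exact List.mem_cons_of_mem _ (List.mem_cons_of_mem _ hr)
    · intro x hx
      have hb'opt := hopt b' (List.mem_cons_self ..)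
      rcases List.mem_cons.1 hx with rfl | hx'
      · -- x = b
        refine ⟨le_trans hdb1 hb'opt.1, fun hxr => ?_⟩
        have h1 : x.2 = b'.2 := le_antisymm hdb1 (by omega)
        have h2 : b'.2 = r.2 := by omega
        exact le_trans (hb'opt.2 h2) (hdb2 h1)
      rcases List.mem_cons.1 hx' with rfl | hx''
      · -- x = kv
        refine ⟨le_trans hdk1 hb'opt.1, fun hxr => ?_⟩
        have h1 : x.2 = b'.2 := le_antisymm hdk1 (by omega)
        have h2 : b'.2 = r.2 := by omega
        exact le_trans (hb'opt.2 h2) (hdk2 h1)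
      · exact hopt x (List.mem_cons_of_mem _ hx'')

-- ===== VERDICT (by name: the statement is the Claim_ definition above) =====
theorem select_skip_reason_top_py_spec : Claim_equal_select_skip_reason_top_py := by
  intro counts _
  unfold Spec_select_skip_reason_top_py
  match counts with
  | [] => rfl
  | c :: t =>
    have hne : c :: t ≠ ([] : List (String × Int)) := by simp
    obtain ⟨m, hm⟩ : ∃ m, PySem.List.max? ((c :: t).map (fun kv => kv.2)) (fun v => v) = some m := by
      cases hmx : PySem.List.max? ((c :: t).map (fun kv => kv.2)) (fun v => v) with
      | none => simp [PySem.List.max?_eq_none_iff] at hmx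
      | some m => exact ⟨m, rfl⟩
    have hmmem := PySem.List.max?_mem hm
    have hmmax := PySem.List.max?_isMax hm
    obtain ⟨kvm, hkvm_mem, hkvm_val⟩ := List.mem_map.1 hmmem
    simp only [select_skip_reason_top_py, select_skip_reason_top_py_alt, if_neg hne, hm]
    set topKeys := ((c :: t).filter (fun kv => kv.2 == m)).map Prod.fst with htk
    have htkne : topKeys ≠ [] := by
      have hin : kvm ∈ (c :: t).filter (fun kv => kv.2 == m) :=
        List.mem_filter.2 ⟨hkvm_mem, by simp [hkvm_val]⟩
      simp only [htk]
      intro hnil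
      rw [List.map_eq_nil_iff] at hnil
      rw [hnil] at hin
      cases hin
    rw [if_neg htkne]
    -- the sorted head h is the minimal top key
    obtain ⟨h, t', hsort⟩ : ∃ h t', PySem.List.sorted topKeys (fun k => k) false = h :: t' := by
      cases hs : PySem.List.sorted topKeys (fun k => k) false with
      | nil => exact absurd ((PySem.List.sorted_eq_nil_iff _ _ _).1 hs) htkne
      | cons h t' => exact ⟨h, t', rfl⟩
    rw [hsort]
    have hhmin : ∀ y ∈ topKeys, h ≤ y := PySem.List.key_head_sorted_le topKeys (fun k => k) hsort
    have hhmem : h ∈ topKeys := by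
      have hmem' : h ∈ PySem.List.sorted topKeys (fun k => k) false := by rw [hsort]; simp
      exact (PySem.List.mem_sorted _ _ _ _).1 hmem'
    obtain ⟨kvh, hkvh_filter, hkvh_fst⟩ := List.mem_map.1 hhmem
    obtain ⟨hkvh_mem, hkvh_val⟩ := List.mem_filter.1 hkvh_filter
    rw [beq_iff_eq] at hkvh_val
    -- B side: the fold returns the optimal pair r
    obtain ⟨r, hfold, hrmem, hropt⟩ := pvBestStep_fold_spec t c
    have hfold' : (c :: t).foldl pvBestStep none = some r := by
      simpa [List.foldl_cons, pvBestStep] using hfold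
    rw [hfold']
    -- r's count equals the max
    have hrle : r.2 ≤ m := hmmax r.2 (List.mem_map.2 ⟨r, hrmem, rfl⟩)
    have hmle : m ≤ r.2 := by
      have := (hropt kvm hkvm_mem).1
      omega
    have hrm : r.2 = m := le_antisymm hrle hmle
    -- r's key is a top key, so h ≤ r.1
    have hr_top : r.1 ∈ topKeys :=
      List.mem_map.2 ⟨r, List.mem_filter.2 ⟨hrmem, by simp [hrm]⟩, rfl⟩
    have h1 : h ≤ r.1 := hhmin _ hr_top
    -- r is optimal against kvh, so r.1 ≤ h
    have h2 : r.1 ≤ h := by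
      have hle := (hropt kvh hkvh_mem).2 (by omega)
      rwa [hkvh_fst] at hle
    simp [PySem.List.pyGet?, PySem.List.pyIdx?, le_antisymm h1 h2]
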